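-- pv_equiv track=rewrite | github.com/KIT-CMS/Excalibur | Plotting/python/utility/toolsZJet.py | get_input_files
-- ===== SOURCE A (Python) =====
-- def get_input_files(args=None):
-- 	"""
-- 	Extract the list of input files from given CLI arguments
--
-- 	:param args: command line arguments
-- 	:type args: list[str]
-- 	:returns: input files and remaining CLI arguments
-- 	:rtype: list[str], list[str]
-- 	"""
-- 	if args is None:
-- 		return [], []
-- 	args_nofiles = []
-- 	input_files = []
-- 	input_file_args = False
-- 	for elem in args:
-- 		if not input_file_args and elem in ("-i", "--files"):
-- 			input_file_args = True
-- 			continue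
-- 		if input_file_args:
-- 			if not elem.startswith("-"):
-- 				input_files.append(elem)
-- 				continue
-- 			else:
-- 				input_file_args = False
-- 		args_nofiles.append(elem)
-- 	return input_files, args_nofiles
-- ===== SOURCE B (Python) =====
-- def get_input_files(args=None):
--     """Extract the list of input files from given CLI arguments."""
--     if args is None:
--         return [], []
--     input_files = []
--     args_nofiles = []
--     rest = args[::-1]  # stack: next token is rest[-1]
--     while rest:
--         tok = rest.pop()
--         if tok in ("-i", "--files"):
--             while rest and not rest[-1].startswith("-"):
--                 input_files.append(rest.pop())
--             if rest:
--                 args_nofiles.append(rest.pop())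
--         else:
--             args_nofiles.append(tok)
--     return input_files, args_nofiles
-- ===== Notes on version B (the rewrite author's own statement) =====
-- stated objective: alternative
-- what changed: Replaces the boolean flag state machine with a consume-the-stack decomposition: on -i/--files an inner loop pops the whole run of non-dash tokens at once (plus the terminating dash token), removing the flag variable entirely.
import Mathlib
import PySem

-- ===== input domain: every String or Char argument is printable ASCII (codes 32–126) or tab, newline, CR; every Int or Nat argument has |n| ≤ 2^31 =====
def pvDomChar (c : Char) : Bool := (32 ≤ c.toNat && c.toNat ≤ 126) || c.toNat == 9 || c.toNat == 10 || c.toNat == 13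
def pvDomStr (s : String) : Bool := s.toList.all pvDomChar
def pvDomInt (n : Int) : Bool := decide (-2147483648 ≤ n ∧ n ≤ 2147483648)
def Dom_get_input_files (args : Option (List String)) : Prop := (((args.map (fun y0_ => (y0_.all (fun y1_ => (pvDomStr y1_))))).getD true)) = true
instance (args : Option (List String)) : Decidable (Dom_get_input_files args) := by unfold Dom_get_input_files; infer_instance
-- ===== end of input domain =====

-- B replaces A's boolean-flag state machine by a consume-the-list decomposition
-- (inner loop grabs the run of files after -i/--files at once); alternative, same cost.

-- ===== PORT A =====
-- state = (args_nofiles, input_files, input_file_args), exactly A's loop body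
def aStep (st : List String × List String × Bool) (elem : String) :
    List String × List String × Bool :=
  let nofiles := st.1
  let files := st.2.1
  let flag := st.2.2
  if !flag && (elem == "-i" || elem == "--files") then
    (nofiles, files, true)
  else if flag && !(PySem.Str.startswith elem "-") then
    (nofiles, files ++ [elem], flag)
  else
    (nofiles ++ [elem], files, false)

def get_input_files (args : Option (List String)) : List String × List String :=
  match args with
  | none => ([], [])
  | some as =>
    let st := as.foldl aStep ([], [], false)
    (st.2.1, st.1)

-- ===== PORT B =====
-- inner while loop: take the run of tokens not starting with "-", return (taken, rest)
def bGrab : List String → List String × List String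
  | [] => ([], [])
  | s :: rest =>
    if PySem.Str.startswith s "-" then ([], s :: rest)
    else
      let p := bGrab rest
      (s :: p.1, p.2)

theorem bGrab_length : ∀ l : List String, (bGrab l).2.length ≤ l.length := by
  intro l
  induction l with
  | nil => simp [bGrab]
  | cons s rest ih =>
    simp only [bGrab]
    split
    · simp
    · simpa using Nat.le_succ_of_le ih

-- outer while loop over the remaining tokens, with the two accumulators
def bLoop (rest files nofiles : List String) : List String × List String :=
  match rest with
  | [] => (files, nofiles)
  | tok :: rest' =>
    if tok == "-i" || tok == "--files" then
      let p := bGrab rest'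
      match h : p.2 with
      | [] => (files ++ p.1, nofiles)
      | d :: r' => bLoop r' (files ++ p.1) (nofiles ++ [d])
    else
      bLoop rest' files (nofiles ++ [tok])
termination_by rest.length
decreasing_by
  · have := bGrab_length rest'
    rw [h] at this
    simp at this ⊢
    omega
  · simp

def get_input_files_alt (args : Option (List String)) : List String × List String :=
  match args with
  | none => ([], [])
  | some as => bLoop as [] []

-- ===== PRECONDITION & SPEC =====
def Spec_get_input_files (args : Option (List String)) (out : List String × List String) : Prop := out = get_input_files_alt args
instance (args : Option (List String)) (out : List String × List String) : Decidable (Spec_get_input_files args out) := by unfold Spec_get_input_files; infer_instance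

-- ===== CLAIM (what is proved, stated in full; the proofs are below) =====
def Claim_equal_get_input_files : Prop := ∀ (args : Option (List String)), Dom_get_input_files args → Spec_get_input_files args (get_input_files args)

-- ===== LEMMAS AND PROOFS =====

-- A's loop in flag = true mode consumes exactly the tokens bGrab takes
theorem foldA_true (l : List String) : ∀ nofiles files,
    l.foldl aStep (nofiles, files, true) =
      (bGrab l).2.foldl aStep (nofiles, files ++ (bGrab l).1, true) := by
  induction l with
  | nil => intro nofiles files; simp [bGrab]
  | cons s rest ih =>
    intro nofiles files
    by_cases hd : PySem.Str.startswith s "-" = true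
    · have hd' : PySem.Chars.startswith s.toList ['-'] = true := by simpa using hd
      simp [bGrab, hd']
    · have hd' : PySem.Chars.startswith s.toList ['-'] = false := by simpa using hd
      simp only [bGrab, hd', Bool.false_eq_true, if_false]
      have hstep : aStep (nofiles, files, true) s = (nofiles, files ++ [s], true) := by
        simp [aStep, hd']
      simp only [List.foldl_cons, hstep, ih]
      simp [hd']

-- a token left behind by bGrab starts with "-"
theorem bGrab_rest_dash : ∀ (l : List String) (d : String) (r' : List String),
    (bGrab l).2 = d :: r' → PySem.Str.startswith d "-" = true := by
  intro l
  induction l with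
  | nil => intro d r' h; simp [bGrab] at h
  | cons s rest ih =>
    intro d r' h
    simp only [bGrab] at h
    split at h
    · next hs => cases h; simpa [PySem.Str.startswith] using hs
    · exact ih _ _ h

-- main invariant: flag = false mode agrees with bLoop (fuel induction on a length bound)
theorem foldA_false_aux : ∀ (n : Nat) (l : List String), l.length ≤ n → ∀ nofiles files,
    (let st := l.foldl aStep (nofiles, files, false); (st.2.1, st.1)) =
      bLoop l files nofiles := by
  intro n
  induction n with
  | zero =>
    intro l hl nofiles files
    have : l = [] := List.eq_nil_of_length_eq_zero (Nat.le_zero.mp hl)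
    subst this; simp [bLoop]
  | succ n ih =>
    intro l hl nofiles files
    match l with
    | [] => simp [bLoop]
    | tok :: rest =>
      have hrest : rest.length ≤ n := by simp at hl; omega
      by_cases hflag : (tok == "-i" || tok == "--files") = true
      · simp only [List.foldl_cons, bLoop, hflag, if_pos]
        have hstep : aStep (nofiles, files, false) tok = (nofiles, files, true) := by
          simp [aStep, hflag]
        rw [hstep, foldA_true]
        match hg : (bGrab rest).2 with
        | [] => simp
        | d :: r' =>
          have hds : PySem.Str.startswith d "-" = true := bGrab_rest_dash rest d r' hg
          have hstep2 : aStep (nofiles, files ++ (bGrab rest).1, true) d =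
              (nofiles ++ [d], files ++ (bGrab rest).1, false) := by
            have hds' : PySem.Chars.startswith d.toList ['-'] = true := by simpa using hds
            simp [aStep, hds']
          simp only [List.foldl_cons, hstep2]
          have hlen : r'.length ≤ n := by
            have := bGrab_length rest
            rw [hg] at this
            simp at this
            omega
          exact ih r' hlen (nofiles ++ [d]) (files ++ (bGrab rest).1)
      · have hstep : aStep (nofiles, files, false) tok = (nofiles ++ [tok], files, false) := by
          simp only [aStep, Bool.not_false, Bool.true_and]
          rw [if_neg hflag]
          simp
        simp only [List.foldl_cons, hstep, bLoop]
        rw [if_neg hflag]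
        exact ih rest hrest (nofiles ++ [tok]) files

theorem foldA_false (l nofiles files : List String) :
    (let st := l.foldl aStep (nofiles, files, false); (st.2.1, st.1)) =
      bLoop l files nofiles :=
  foldA_false_aux l.length l (Nat.le_refl _) nofiles files

-- ===== VERDICT (by name: the statement is the Claim_ definition above) =====
theorem get_input_files_spec : Claim_equal_get_input_files := by
  intro args _
  unfold Spec_get_input_files get_input_files get_input_files_alt
  match args with
  | none => rfl
  | some as => exact foldA_false as [] []
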